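-- pv_equiv track=rewrite | github.com/dhflxhdxhd/for-coding-test | programmars/search/test.py | solution
-- ===== SOURCE A (Python) =====
-- def solution(answers):
--     ans1 = [1,2,3,4,5]
--     ans2 = [2,1,2,3,2,4,2,5]
--     ans3 = [3,3,1,1,2,2,4,4,5,5]
--     check = [0,0,0]
--     answer = []
--
--     for i in range(len((answers))):
--         if answers[i] == ans1[i%5]:
--             check[0] += 1
--
--         if answers[i] == ans2[i%8]:
--             check[1] += 1
--
--         if answers[i] == ans3[i%10]:
--             check[2] += 1
--
--     max_score = max(check)
--
--     for i, ck in enumerate(check):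
--         if ck == max_score:
--             answer.append(i+1)
--     return answer
-- ===== SOURCE B (Python) =====
-- def solution(answers):
--     # Build a (index mod 40, value) histogram in one pass; 40 = lcm(5, 8, 10), so each
--     # residue class mod 40 meets each pattern at a fixed slot.  Scores are then read off
--     # the 40 buckets instead of comparing every answer against every pattern.
--     patterns = [[1, 2, 3, 4, 5],
--                 [2, 1, 2, 3, 2, 4, 2, 5],
--                 [3, 3, 1, 1, 2, 2, 4, 4, 5, 5]]
--     cnt = {}
--     for i, a in enumerate(answers):
--         key = (i % 40, a)
--         cnt[key] = cnt.get(key, 0) + 1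
--     check = [sum(cnt.get((r, p[r % len(p)]), 0) for r in range(40)) for p in patterns]
--     m = max(check)
--     return [i + 1 for i, c in enumerate(check) if c == m]
-- ===== Notes on version B (the rewrite author's own statement) =====
-- stated objective: alternative
-- what changed: A compares every answer against all three patterns in one interleaved loop; B builds a (index mod 40, value) histogram (40 = lcm of the pattern lengths) in a single pass and then reads each pattern's score off the 40 residue buckets, so no per-element pattern comparison remains.
import Mathlib
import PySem

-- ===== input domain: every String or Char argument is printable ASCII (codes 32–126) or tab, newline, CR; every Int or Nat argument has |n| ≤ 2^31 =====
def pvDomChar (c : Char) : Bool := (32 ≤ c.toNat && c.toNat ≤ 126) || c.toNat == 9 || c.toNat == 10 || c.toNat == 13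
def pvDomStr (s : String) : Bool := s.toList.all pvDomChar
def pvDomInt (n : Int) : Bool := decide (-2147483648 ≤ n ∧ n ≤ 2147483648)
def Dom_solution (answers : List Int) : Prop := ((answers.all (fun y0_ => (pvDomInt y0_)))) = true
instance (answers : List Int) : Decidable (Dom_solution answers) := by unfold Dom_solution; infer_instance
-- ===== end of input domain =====

-- B replaces A's per-element comparison loop against the three patterns by a single pass
-- building a (index mod 40, value) histogram (40 = lcm(5,8,10)), from which the three
-- scores are read off the 40 residue buckets (alternative decomposition, same O(n) cost).

-- ===== PORT A =====
-- the body of A's for-loop (indices are always in range, so pyGetD's default 0 is never hit)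
def solutionStep (answers ans1 ans2 ans3 : List Int) (c : Int × Int × Int) (i : Int) :
    Int × Int × Int :=
  let c := if PySem.List.pyGetD answers i 0 = PySem.List.pyGetD ans1 (PySem.Int.mod i 5) 0 then
    (c.1 + 1, c.2.1, c.2.2) else c
  let c := if PySem.List.pyGetD answers i 0 = PySem.List.pyGetD ans2 (PySem.Int.mod i 8) 0 then
    (c.1, c.2.1 + 1, c.2.2) else c
  let c := if PySem.List.pyGetD answers i 0 = PySem.List.pyGetD ans3 (PySem.Int.mod i 10) 0 then
    (c.1, c.2.1, c.2.2 + 1) else c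
  c

def solution (answers : List Int) : List Int :=
  let ans1 : List Int := [1, 2, 3, 4, 5]
  let ans2 : List Int := [2, 1, 2, 3, 2, 4, 2, 5]
  let ans3 : List Int := [3, 3, 1, 1, 2, 2, 4, 4, 5, 5]
  let check :=
    (PySem.List.pyRange 0 (answers.length : Int) 1).foldl
      (solutionStep answers ans1 ans2 ans3) (0, 0, 0)
  let checkL : List Int := [check.1, check.2.1, check.2.2]
  -- max(check): checkL has 3 elements so max? is always some; .getD 0 is never the default
  let maxScore := (PySem.List.max? checkL (fun x => x)).getD 0
  (PySem.List.enumerate checkL 0).foldl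
    (fun ans p => if p.2 = maxScore then ans ++ [p.1 + 1] else ans) []

-- ===== PORT B =====
-- cnt[(i % 40, a)] = cnt.get((i % 40, a), 0) + 1  over enumerate(answers)
def solution_alt (answers : List Int) : List Int :=
  let patterns : List (List Int) :=
    [[1, 2, 3, 4, 5], [2, 1, 2, 3, 2, 4, 2, 5], [3, 3, 1, 1, 2, 2, 4, 4, 5, 5]]
  let cnt : PySem.Dict (Int × Int) Int :=
    (PySem.List.enumerate answers 0).foldl
      (fun d p =>
        d.insert (PySem.Int.mod p.1 40, p.2) (d.getD (PySem.Int.mod p.1 40, p.2) 0 + 1))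
      PySem.Dict.empty
  -- check = [sum(cnt.get((r, p[r % len(p)]), 0) for r in range(40)) for p in patterns]
  let check := patterns.map (fun p =>
    ((PySem.List.pyRange 0 40 1).map (fun r =>
      cnt.getD (r, PySem.List.pyGetD p (PySem.Int.mod r (p.length : Int)) 0) 0)).sum)
  let m := (PySem.List.max? check (fun x => x)).getD 0
  ((PySem.List.enumerate check 0).filter (fun p => p.2 == m)).map (fun p => p.1 + 1)

-- ===== PRECONDITION & SPEC =====
def Spec_solution (answers : List Int) (out : List Int) : Prop := out = solution_alt answers
instance (answers : List Int) (out : List Int) : Decidable (Spec_solution answers out) := by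
  unfold Spec_solution; infer_instance

-- ===== CLAIM (what is proved, stated in full; the proofs are below) =====
def Claim_equal_solution : Prop :=
  ∀ (answers : List Int), Dom_solution answers → Spec_solution answers (solution answers)

-- ===== LEMMAS AND PROOFS =====

-- proof-side abbreviation: the number of answers matching a cyclic pattern
def scoreB (answers pat : List Int) : Int :=
  ((PySem.List.enumerate answers 0).countP
    (fun p => p.2 == PySem.List.pyGetD pat (PySem.Int.mod p.1 (pat.length : Int)) 0) : Nat)

-- one step of the count: appending the n-th element adds the matching indicator
lemma scoreB_take_succ (answers pat : List Int) (n : Nat) (h : n < answers.length) :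
    scoreB (answers.take (n + 1)) pat =
      scoreB (answers.take n) pat +
        (if answers[n] = PySem.List.pyGetD pat (PySem.Int.mod (n : Int) (pat.length : Int)) 0
         then 1 else 0) := by
  unfold scoreB
  rw [← List.take_concat_get' answers n h, PySem.List.enumerate_append, List.countP_append]
  simp [PySem.List.enumerate_cons, List.countP_cons, List.length_take, Nat.min_eq_left h.le]

-- A's fold over range(n) computes the three per-pattern counts of the first n answers
lemma fold_eq (answers : List Int) (n : Nat) (hn : n ≤ answers.length) :
    (PySem.List.pyRange 0 (n : Int) 1).foldl
        (solutionStep answers [1,2,3,4,5] [2,1,2,3,2,4,2,5] [3,3,1,1,2,2,4,4,5,5]) (0, 0, 0) =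
      (scoreB (answers.take n) [1,2,3,4,5],
       scoreB (answers.take n) [2,1,2,3,2,4,2,5],
       scoreB (answers.take n) [3,3,1,1,2,2,4,4,5,5]) := by
  induction n with
  | zero => simp [PySem.List.pyRange_one_eq_nil, scoreB]
  | succ k ih =>
    have hk : k < answers.length := hn
    have : ((k + 1 : Nat) : Int) = (k : Int) + 1 := by push_cast; ring
    rw [this, PySem.List.pyRange_one_succ_right (by positivity), List.foldl_append,
        ih hk.le]
    simp only [List.foldl]
    rw [scoreB_take_succ _ _ _ hk, scoreB_take_succ _ _ _ hk, scoreB_take_succ _ _ _ hk]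
    unfold solutionStep
    have hg : PySem.List.pyGetD answers (k : Int) 0 = answers[k] := by
      rw [PySem.List.pyGetD_natCast, List.getD_eq_getElem?_getD, List.getElem?_eq_getElem hk]
      rfl
    rw [hg]
    norm_num
    split_ifs <;> simp_all

-- summing the indicator of a single residue r0 over range(40) picks it out exactly once
lemma sum_pick_gen (R : List Int) (r0 : Int) (hnd : R.Nodup) (hmem : r0 ∈ R) (c : Int) :
    (R.map (fun r => if r = r0 then c else 0)).sum = c := by
  induction R with
  | nil => simp at hmem
  | cons a l ih =>
    rcases List.nodup_cons.mp hnd with ⟨hna, hndl⟩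
    by_cases ha : a = r0
    · subst ha
      simp only [List.map_cons, List.sum_cons]
      have hz : ∀ x ∈ l.map (fun r => if r = a then c else 0), x = 0 := by
        intro x hx
        rcases List.mem_map.mp hx with ⟨r, hr, hrx⟩
        have : r ≠ a := fun h => hna (h ▸ hr)
        simpa [this] using hrx.symm
      rw [List.sum_eq_zero hz]; simp
    · have hr0 : r0 ∈ l := by
        rcases List.mem_cons.mp hmem with h | h
        · exact absurd h.symm ha
        · exact h
      simp only [List.map_cons, List.sum_cons, if_neg ha, ih hndl hr0]
      ring

lemma sum_pick (r0 : Int) (h0 : 0 ≤ r0) (h40 : r0 < 40) (c : Int) :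
    ((PySem.List.pyRange 0 40 1).map (fun r => if r = r0 then c else 0)).sum = c := by
  exact sum_pick_gen _ _ (PySem.List.nodup_pyRange_one 0 40)
    (by rw [PySem.List.mem_pyRange_one]; exact ⟨h0, h40⟩) c

-- the histogram read-off over range(40) equals the direct cyclic-pattern count
lemma bucket_sum (l : List (Int × Int)) (pat : List Int)
    (hdvd : (pat.length : Int) ∣ 40) (hpos : 0 < (pat.length : Int))
    (hfst : ∀ p ∈ l, 0 ≤ p.1) :
    ((PySem.List.pyRange 0 40 1).map (fun r =>
        ((l.countP (fun p =>
          (PySem.Int.mod p.1 40, p.2) ==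
            (r, PySem.List.pyGetD pat (PySem.Int.mod r (pat.length : Int)) 0))) : Int))).sum
      = ((l.countP (fun p =>
          p.2 == PySem.List.pyGetD pat (PySem.Int.mod p.1 (pat.length : Int)) 0)) : Nat) := by
  induction l with
  | nil => simp
  | cons a l ih =>
    have hal : ∀ p ∈ l, 0 ≤ p.1 := fun p hp => hfst p (List.mem_cons_of_mem a hp)
    have h40 : (0 : Int) < 40 := by norm_num
    have hm : PySem.Int.mod (PySem.Int.mod a.1 40) (pat.length : Int) =
        PySem.Int.mod a.1 (pat.length : Int) := by
      rw [PySem.Int.mod_eq_emod_of_pos hpos, PySem.Int.mod_eq_emod_of_pos hpos,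
          PySem.Int.mod_eq_emod_of_pos h40]
      exact Int.emod_emod_of_dvd a.1 hdvd
    have key : ∀ r : Int,
        (if ((PySem.Int.mod a.1 40, a.2) ==
            (r, PySem.List.pyGetD pat (PySem.Int.mod r (pat.length : Int)) 0)) then (1 : Int)
         else 0) =
        if r = PySem.Int.mod a.1 40 then
          (if a.2 = PySem.List.pyGetD pat (PySem.Int.mod a.1 (pat.length : Int)) 0 then (1 : Int)
           else 0)
        else 0 := by
      intro r
      have hmodeq : PySem.Int.mod a.1 40 = a.1 % 40 := PySem.Int.mod_eq_emod_of_pos h40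
      rw [hmodeq] at hm
      rw [hmodeq]
      by_cases hr : r = a.1 % 40
      · subst hr
        rw [hm]
        by_cases h2 : a.2 = PySem.List.pyGetD pat (PySem.Int.mod a.1 (pat.length : Int)) 0
        · simp [h2]
        · simp [h2]
      · have hra : ¬ (a.1 % 40 = r) := fun h => hr h.symm
        rw [if_neg hr]
        simp [Prod.ext_iff, hra]
    simp only [List.countP_cons]
    push_cast [apply_ite (fun n : Nat => (n : Int))]
    rw [show (fun r : Int =>
          ((l.countP (fun p =>
            (PySem.Int.mod p.1 40, p.2) ==
              (r, PySem.List.pyGetD pat (PySem.Int.mod r (pat.length : Int)) 0))) : Int) +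
          (if ((PySem.Int.mod a.1 40, a.2) ==
              (r, PySem.List.pyGetD pat (PySem.Int.mod r (pat.length : Int)) 0)) then (1 : Int)
           else 0)) =
        (fun r : Int =>
          ((l.countP (fun p =>
            (PySem.Int.mod p.1 40, p.2) ==
              (r, PySem.List.pyGetD pat (PySem.Int.mod r (pat.length : Int)) 0))) : Int) +
          (if r = PySem.Int.mod a.1 40 then
            (if a.2 = PySem.List.pyGetD pat (PySem.Int.mod a.1 (pat.length : Int)) 0 then (1 : Int)
             else 0)
           else 0)) from funext (fun r => by rw [key r])]
    rw [PySem.List.sum_map_add_int, ih hal,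
        sum_pick (PySem.Int.mod a.1 40) (PySem.Int.mod_nonneg a.1 h40)
          (PySem.Int.mod_lt a.1 h40)]
    simp [beq_iff_eq]

-- the winner-collecting loop of A equals B's filter/map comprehension on a 3-element list
lemma last_loop (c1 c2 c3 m : Int) :
    (PySem.List.enumerate [c1, c2, c3] 0).foldl
        (fun ans p => if p.2 = m then ans ++ [p.1 + 1] else ans) [] =
      ((PySem.List.enumerate [c1, c2, c3] 0).filter (fun p => p.2 == m)).map
        (fun p => p.1 + 1) := by
  by_cases h1 : c1 = m <;> by_cases h2 : c2 = m <;> by_cases h3 : c3 = m <;>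
    simp [PySem.List.enumerate_cons, PySem.List.enumerate_nil, List.foldl, h1, h2, h3]

-- B's histogram score equals the direct per-pattern count
lemma alt_score_eq (answers pat : List Int)
    (hdvd : (pat.length : Int) ∣ 40) (hpos : 0 < (pat.length : Int)) :
    ((PySem.List.pyRange 0 40 1).map (fun r =>
      ((PySem.List.enumerate answers 0).foldl
        (fun d p =>
          d.insert (PySem.Int.mod p.1 40, p.2) (d.getD (PySem.Int.mod p.1 40, p.2) 0 + 1))
        (PySem.Dict.empty : PySem.Dict (Int × Int) Int)).getD
          (r, PySem.List.pyGetD pat (PySem.Int.mod r (pat.length : Int)) 0) 0)).sum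
      = scoreB answers pat := by
  have hcnt : (PySem.List.enumerate answers 0).foldl
        (fun d p =>
          d.insert (PySem.Int.mod p.1 40, p.2) (d.getD (PySem.Int.mod p.1 40, p.2) 0 + 1))
        (PySem.Dict.empty : PySem.Dict (Int × Int) Int)
      = PySem.Dict.counter
          ((PySem.List.enumerate answers 0).map (fun p => (PySem.Int.mod p.1 40, p.2))) := by
    rw [← PySem.Dict.foldl_insert_getD_add_one_eq_counter, List.foldl_map]
  have hfst : ∀ p ∈ PySem.List.enumerate answers 0, 0 ≤ p.1 := by
    intro p hp
    have : p.1 ∈ (PySem.List.enumerate answers 0).map (fun x => x.1) :=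
      List.mem_map.mpr ⟨p, hp, rfl⟩
    rw [PySem.List.map_fst_enumerate] at this
    exact (PySem.List.mem_pyRange_one.mp this).1
  simp only [hcnt, PySem.Dict.getD_counter, List.count_eq_countP, List.countP_map]
  unfold scoreB
  rw [← bucket_sum (PySem.List.enumerate answers 0) pat hdvd hpos hfst]
  rfl

-- ===== VERDICT (by name: the statement is the Claim_ definition above) =====
theorem solution_spec : Claim_equal_solution := by
  intro answers _
  unfold Spec_solution solution solution_alt
  simp only [List.map]
  rw [fold_eq answers answers.length le_rfl]
  simp only [List.take_length]
  rw [alt_score_eq answers [1,2,3,4,5] (by norm_num) (by norm_num),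
      alt_score_eq answers [2,1,2,3,2,4,2,5] (by norm_num) (by norm_num),
      alt_score_eq answers [3,3,1,1,2,2,4,4,5,5] (by norm_num) (by norm_num)]
  exact last_loop _ _ _ _
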